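-- pv_equiv track=rewrite | github.com/sahaib9747/Problem-Solving-Solutions | URI/page_1/1187.py | topArea
-- ===== SOURCE A (Python) =====
-- def topArea(array, row=0, col=1, topSum=0):
--     if row == 5:
--         return topSum
--     elif col == (11 - row):
--         row += 1
--         col = (row + 1)
--     else:
--         topSum = array[row][col]
--         col += 1
--     return topSum + topArea(array, row, col)
-- ===== SOURCE B (Python) =====
-- def topArea(array, row=0, col=1, topSum=0):
--     # Row-wise sweep of the triangular region: row r contributes columns
--     # r+1 .. 10-r, except the starting row, which begins at the given col.
--     total = topSum
--     r = row
--     while r != 5: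
--         start = col if r == row else r + 1
--         for c in range(start, 11 - r):
--             total += array[r][c]
--         r += 1
--     return total
-- ===== Notes on version B (the rewrite author's own statement) =====
-- stated objective: simpler
-- what changed: A's cell-by-cell right-fold recursion (one call and one branch per cell, re-passing an accumulator the recursive call resets) is replaced by a row-wise while loop that adds each row's whole column range into one running total seeded with topSum.
-- intended difference: On calls that start mid-row with a nonzero accumulator (topSum != 0, row != 5, col != 11-row) A's first step overwrites topSum with a cell value and silently drops the passed-in accumulator, returning only the region sum; B returns topSum + region sum, which is what an accumulator parameter is for. — e.g. on topArea([[9, 9], [8, 8], [7, 7], [6, 6], [1, 2, 3, 4, 5, 6, 7, 8]], 4, 5, 1): A returns 13, B returns 14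
import Mathlib
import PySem

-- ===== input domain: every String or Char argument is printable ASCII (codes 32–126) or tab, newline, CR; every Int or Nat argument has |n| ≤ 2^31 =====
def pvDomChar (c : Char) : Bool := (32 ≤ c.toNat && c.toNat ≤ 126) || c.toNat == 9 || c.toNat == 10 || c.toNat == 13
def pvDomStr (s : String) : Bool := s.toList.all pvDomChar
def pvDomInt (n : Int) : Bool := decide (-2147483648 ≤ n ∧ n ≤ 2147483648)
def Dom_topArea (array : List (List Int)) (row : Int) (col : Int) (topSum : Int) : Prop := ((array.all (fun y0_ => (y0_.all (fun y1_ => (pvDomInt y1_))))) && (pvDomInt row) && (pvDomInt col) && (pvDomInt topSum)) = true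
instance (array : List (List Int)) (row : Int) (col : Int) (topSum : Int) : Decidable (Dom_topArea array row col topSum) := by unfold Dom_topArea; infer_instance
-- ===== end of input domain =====

-- B replaces A's cell-by-cell right-fold recursion by a row-wise while loop adding
-- each row's column range into one running total seeded with topSum (objective: simpler); on
-- mid-row starts with topSum ≠ 0 the two differ on purpose (see D_topArea below).

-- array[row][col], Python indexing; 0 stands for the IndexError case, which Pre_ excludes
def pvCell (array : List (List Int)) (r c : Int) : Int :=
  ((PySem.List.pyGet? array r).bind (fun xs => PySem.List.pyGet? xs c)).getD 0

-- ===== PORT A =====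
-- fuel is only a totality guard for A's recursion (Python would recurse forever /
-- raise when col overshoots the 11-row boundary); Pre_ inputs never exhaust it
def pvFuel (row col : Int) : Nat :=
  ((5 - row).toNat + 1) * ((5 - row).toNat + 1) + (11 - row - col).toNat + 8

-- literal transliteration of A's recursion (the recursive call passes topSum's default 0)
def topAreaGo : Nat → List (List Int) → Int → Int → Int → Int
  | 0, _, _, _, topSum => topSum
  | fuel + 1, array, row, col, topSum =>
    if row = 5 then topSum
    else if col = 11 - row then topSum + topAreaGo fuel array (row + 1) (row + 2) 0
    else pvCell array row col + topAreaGo fuel array row (col + 1) 0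

def topArea (array : List (List Int)) (row : Int) (col : Int) (topSum : Int) : Int :=
  topAreaGo (pvFuel row col) array row col topSum

-- ===== PORT B =====
-- Source B's 'while r != 5' row sweep; its fuel (5-row)+1 covers every terminating run
-- (for row > 5 the Python while-loop never exits; those inputs are outside Pre_)
def topAreaLoopB (fuel : Nat) (array : List (List Int)) (row col : Int) (r : Int) (total : Int) : Int :=
  match fuel with
  | 0 => total
  | fuel + 1 =>
    if r = 5 then total
    else topAreaLoopB fuel array row col (r + 1)
      ((PySem.List.pyRange (if r = row then col else r + 1) (11 - r) 1).foldl
        (fun t c => t + pvCell array r c) total)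

def topArea_alt (array : List (List Int)) (row : Int) (col : Int) (topSum : Int) : Int :=
  topAreaLoopB ((5 - row).toNat + 1) array row col row topSum

-- ===== PRECONDITION & SPEC =====
-- starting position s in row r is traversable: either the row is skipped at once
-- (s = 11 - r) or it exists and every visited index s .. 10-r is in Python range
def pvRowOk (array : List (List Int)) (r s : Int) : Bool :=
  decide (s = 11 - r) ||
  (decide (s < 11 - r) &&
    (match PySem.List.pyGet? array r with
     | some xs => decide (-(xs.length : Int) ≤ s ∧ 11 - r ≤ (xs.length : Int))
     | none => false))

-- exactly the inputs on which the Python A returns (everywhere else it raises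
-- IndexError or RecursionError: row > 5, a start column past the 11-row boundary,
-- or a visited index out of range; -(len)-1 ≤ row is implied by the tail-row
-- conditions and only makes Pre_ cheap to decide)
def Pre_topArea (array : List (List Int)) (row : Int) (col : Int) (topSum : Int) : Prop :=
  row = 5 ∨ (row < 5 ∧ -(array.length : Int) - 1 ≤ row ∧ pvRowOk array row col = true ∧
    ∀ r ∈ PySem.List.pyRange (row + 1) 5 1, pvRowOk array r (r + 1) = true)

instance (array : List (List Int)) (row : Int) (col : Int) (topSum : Int) : Decidable (Pre_topArea array row col topSum) := by
  unfold Pre_topArea; infer_instance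

def pvWitness_topArea : List (List Int) × Int × Int × Int :=
  ([[9, 9], [8, 8], [7, 7], [6, 6], [1, 2, 3, 4, 5, 6, 7, 8]], 4, 5, 0)

-- On calls that start mid-row with a nonzero accumulator (topSum ≠ 0, row ≠ 5, col ≠ 11-row)
-- A's first step overwrites topSum with a cell value and silently drops the passed-in
-- accumulator, returning only the region sum; B returns topSum + region sum, which is
-- what an accumulator parameter is for.
def D_topArea (array : List (List Int)) (row : Int) (col : Int) (topSum : Int) : Prop :=
  topSum ≠ 0 ∧ row ≠ 5 ∧ col ≠ 11 - row

instance (array : List (List Int)) (row : Int) (col : Int) (topSum : Int) : Decidable (D_topArea array row col topSum) := by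
  unfold D_topArea; infer_instance

def Spec_topArea (array : List (List Int)) (row : Int) (col : Int) (topSum : Int) (out : Int) : Prop := ¬ D_topArea array row col topSum → out = topArea_alt array row col topSum
instance (array : List (List Int)) (row : Int) (col : Int) (topSum : Int) (out : Int) : Decidable (Spec_topArea array row col topSum out) := by unfold Spec_topArea; infer_instance

def pvDiffWitness_topArea : List (List Int) × Int × Int × Int :=
  ([[9, 9], [8, 8], [7, 7], [6, 6], [1, 2, 3, 4, 5, 6, 7, 8]], 4, 5, 1)

def pvDiffWitnessOut_topArea : Int × Int := (13, 14)

-- ===== CLAIM (what is proved, stated in full; the proofs are below) =====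
def Claim_unchanged_topArea : Prop := ∀ (array : List (List Int)) (row : Int) (col : Int) (topSum : Int), Dom_topArea array row col topSum → Pre_topArea array row col topSum → Spec_topArea array row col topSum (topArea array row col topSum)
def Claim_changed_topArea : Prop := Dom_topArea (pvDiffWitness_topArea.1) (pvDiffWitness_topArea.2.1) (pvDiffWitness_topArea.2.2.1) (pvDiffWitness_topArea.2.2.2) ∧ Pre_topArea (pvDiffWitness_topArea.1) (pvDiffWitness_topArea.2.1) (pvDiffWitness_topArea.2.2.1) (pvDiffWitness_topArea.2.2.2) ∧ D_topArea (pvDiffWitness_topArea.1) (pvDiffWitness_topArea.2.1) (pvDiffWitness_topArea.2.2.1) (pvDiffWitness_topArea.2.2.2) ∧ topArea (pvDiffWitness_topArea.1) (pvDiffWitness_topArea.2.1) (pvDiffWitness_topArea.2.2.1) (pvDiffWitness_topArea.2.2.2) = pvDiffWitnessOut_topArea.1 ∧ topArea_alt (pvDiffWitness_topArea.1) (pvDiffWitness_topArea.2.1) (pvDiffWitness_topArea.2.2.1) (pvDiffWitness_topArea.2.2.2) = pvDiffWitnessOut_topArea.2 ∧ pvDiffWitnessOut_topArea.1 ≠ 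pvDiffWitnessOut_topArea.2
def Claim_exact_topArea : Prop := ∀ (array : List (List Int)) (row : Int) (col : Int) (topSum : Int), Dom_topArea array row col topSum → Pre_topArea array row col topSum → D_topArea array row col topSum → topArea array row col topSum ≠ topArea_alt array row col topSum

-- ===== LEMMAS AND PROOFS =====

-- sum of row r's cells from column s up to the 11-r boundary
def rowSumFrom (array : List (List Int)) (r s : Int) : Int :=
  ((PySem.List.pyRange s (11 - r) 1).map (fun c => pvCell array r c)).sum

-- sum of the full rows r .. 4 (each starting at r+1)
def tailSum (array : List (List Int)) (r : Int) : Int :=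
  ((PySem.List.pyRange r 5 1).map (fun r' => rowSumFrom array r' (r' + 1))).sum

-- fuel that the tail rows 5-m .. 4 consume
def rowsFuel : Nat → Nat
  | 0 => 0
  | m + 1 => (2 * m + 3) + rowsFuel m

theorem rowsFuel_eq (m : Nat) : rowsFuel m = m * m + 2 * m := by
  induction m with
  | zero => rfl
  | succ k ih => simp [rowsFuel, ih]; ring

theorem topAreaGo_succ (array : List (List Int)) (fuel : Nat) (row col acc : Int) :
    topAreaGo (fuel + 1) array row col acc =
      if row = 5 then acc
      else if col = 11 - row then acc + topAreaGo fuel array (row + 1) (row + 2) 0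
      else pvCell array row col + topAreaGo fuel array row (col + 1) 0 := rfl

theorem topAreaGo_five (array : List (List Int)) : ∀ (f : Nat) (c : Int),
    topAreaGo f array 5 c 0 = 0 := by
  intro f c; cases f <;> simp [topAreaGo]

-- one row of A's recursion: consumes 11-r-c mid steps plus the boundary step;
-- the accumulator survives only when the very first step is the boundary step
theorem topAreaGo_row (array : List (List Int)) : ∀ (n : Nat) (f : Nat) (r c acc : Int),
    (n : Int) = 11 - r - c → r ≠ 5 →
    topAreaGo (n + f + 1) array r c acc =
      (if c = 11 - r then acc else 0) + rowSumFrom array r c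
        + topAreaGo f array (r + 1) (r + 2) 0 := by
  intro n
  induction n with
  | zero =>
    intro f r c acc hn hr
    have hc : c = 11 - r := by omega
    simp [topAreaGo, hr, hc, rowSumFrom, PySem.List.pyRange_one_eq_nil (le_refl (11 - r))]
  | succ k ih =>
    intro f r c acc hn hr
    have hc : c < 11 - r := by omega
    have hc' : c ≠ 11 - r := by omega
    have hfuel : k + 1 + f + 1 = (k + f + 1) + 1 := by omega
    rw [hfuel, topAreaGo_succ]
    rw [if_neg hr, if_neg hc']
    have hk : (k : Int) = 11 - r - (c + 1) := by omega
    rw [ih f r (c + 1) 0 hk hr]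
    have hcons : PySem.List.pyRange c (11 - r) 1 = c :: PySem.List.pyRange (c + 1) (11 - r) 1 :=
      PySem.List.pyRange_one_cons hc
    simp only [rowSumFrom, hcons, List.map_cons, List.sum_cons]
    split_ifs <;> ring

-- the tail rows: from (r, r+1) with r = 5 - m, A's recursion computes tailSum r
theorem topAreaGo_tail (array : List (List Int)) : ∀ (m : Nat) (f : Nat) (r : Int),
    r = 5 - (m : Int) →
    topAreaGo (rowsFuel m + f) array r (r + 1) 0 = tailSum array r := by
  intro m
  induction m with
  | zero =>
    intro f r hr
    have h5 : r = 5 := by omega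
    subst h5
    rw [topAreaGo_five]
    simp [tailSum, PySem.List.pyRange_one_eq_nil (by omega : (5:Int) ≤ 5)]
  | succ k ih =>
    intro f r hr
    have hr5 : r ≠ 5 := by omega
    have hlt : r < 5 := by omega
    have hfuel : rowsFuel (k + 1) + f = (2 * k + 2) + (rowsFuel k + f) + 1 := by
      simp [rowsFuel]; omega
    rw [hfuel]
    rw [topAreaGo_row array (2 * k + 2) (rowsFuel k + f) r (r + 1) 0 (by push_cast; omega) hr5]
    rw [show (r + 2 : Int) = r + 1 + 1 by ring]
    rw [ih f (r + 1) (by push_cast at hr ⊢; omega)]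
    have hne : r + 1 ≠ 11 - r := by omega
    rw [if_neg hne]
    have hcons : PySem.List.pyRange r 5 1 = r :: PySem.List.pyRange (r + 1) 5 1 :=
      PySem.List.pyRange_one_cons hlt
    simp [tailSum, hcons]

theorem topAreaLoopB_succ (fuel : Nat) (array : List (List Int)) (row col r total : Int) :
    topAreaLoopB (fuel + 1) array row col r total =
      if r = 5 then total
      else topAreaLoopB fuel array row col (r + 1)
        ((PySem.List.pyRange (if r = row then col else r + 1) (11 - r) 1).foldl
          (fun t c => t + pvCell array r c) total) := rfl

-- B's while-loop over the tail rows (r > row, so the start is always r+1)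
theorem topAreaLoopB_tail (array : List (List Int)) (row col : Int) :
    ∀ (m f : Nat) (r total : Int), r = 5 - (m : Int) → row < r →
    topAreaLoopB (m + f + 1) array row col r total = total + tailSum array r := by
  intro m
  induction m with
  | zero =>
    intro f r total hr _
    have h5 : r = 5 := by omega
    subst h5
    simp [topAreaLoopB, tailSum, PySem.List.pyRange_one_eq_nil (by omega : (5:Int) ≤ 5)]
  | succ k ih =>
    intro f r total hr hrow
    have hr5 : r ≠ 5 := by omega
    have hlt : r < 5 := by omega
    have hfuel : k + 1 + f + 1 = (k + f + 1) + 1 := by omega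
    rw [hfuel, topAreaLoopB_succ, if_neg hr5]
    rw [if_neg (by omega : ¬ r = row)]
    rw [PySem.List.foldl_add]
    rw [ih f (r + 1) _ (by push_cast at hr ⊢; omega) (by omega)]
    have hcons : PySem.List.pyRange r 5 1 = r :: PySem.List.pyRange (r + 1) 5 1 :=
      PySem.List.pyRange_one_cons hlt
    simp [tailSum, hcons, rowSumFrom]
    ring

-- B's value, as a closed sum: topSum + head row from col + the tail rows
theorem topArea_alt_eq (array : List (List Int)) (row col topSum : Int) (hlt : row < 5) :
    topArea_alt array row col topSum =
      topSum + rowSumFrom array row col + tailSum array (row + 1) := by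
  unfold topArea_alt
  set m : Nat := (4 - row).toNat with hm
  have hmr : (m : Int) = 4 - row := by omega
  have hfuel : (5 - row).toNat + 1 = (m + 0 + 1) + 1 := by omega
  rw [hfuel, topAreaLoopB_succ, if_neg (by omega : ¬ row = 5), if_pos rfl]
  rw [PySem.List.foldl_add]
  rw [topAreaLoopB_tail array row col m 0 (row + 1) _ (by omega) (by omega)]
  simp only [rowSumFrom]

-- on Pre_ (row < 5 case), A's value is the region sum, plus topSum exactly when
-- the first step is the boundary step
theorem topArea_eq (array : List (List Int)) (row col topSum : Int)
    (hlt : row < 5) (hcol : col ≤ 11 - row) :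
    topArea array row col topSum =
      (if col = 11 - row then topSum else 0) + rowSumFrom array row col
        + tailSum array (row + 1) := by
  unfold topArea
  set m : Nat := (4 - row).toNat with hm
  have hmr : (m : Int) = 4 - row := by omega
  set n : Nat := (11 - row - col).toNat with hn
  have hnr : (n : Int) = 11 - row - col := by omega
  have h5 : (5 - row).toNat = m + 1 := by omega
  have h11 : (11 - row - col).toNat = n := by omega
  obtain ⟨f2, hfuel⟩ : ∃ f2, pvFuel row col = n + (rowsFuel m + f2) + 1 := by
    refine ⟨pvFuel row col - (n + rowsFuel m + 1), ?_⟩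
    unfold pvFuel
    rw [rowsFuel_eq, h5, h11]
    have hx : (m + 1 + 1) * (m + 1 + 1) = m * m + 4 * m + 4 := by ring
    rw [hx]
    generalize m * m = q
    omega
  rw [hfuel]
  rw [topAreaGo_row array n (rowsFuel m + f2) row col topSum hnr (by omega)]
  rw [show (row + 2 : Int) = row + 1 + 1 by ring]
  rw [topAreaGo_tail array m f2 (row + 1) (by omega)]

theorem pre_col_le (array : List (List Int)) (row col : Int)
    (h : pvRowOk array row col = true) : col ≤ 11 - row := by
  unfold pvRowOk at h
  simp only [Bool.or_eq_true, Bool.and_eq_true, decide_eq_true_eq] at h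
  rcases h with h | ⟨h, -⟩ <;> omega

-- ===== VERDICT (by name: the statement is the Claim_ definition above) =====
theorem topArea_spec : Claim_unchanged_topArea := by
  intro array row col topSum _ hpre hnd
  rcases hpre with h5 | ⟨hlt, -, hok, -⟩
  · subst h5
    unfold topArea topArea_alt
    have h1 : pvFuel 5 col = (pvFuel 5 col - 1) + 1 := by unfold pvFuel; omega
    have h2 : ((5:Int) - 5).toNat + 1 = 0 + 1 := by norm_num
    rw [h1, h2]
    simp [topAreaGo, topAreaLoopB]
  · have hcol := pre_col_le array row col hok
    rw [topArea_eq array row col topSum hlt hcol,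
        topArea_alt_eq array row col topSum hlt]
    by_cases hb : col = 11 - row
    · rw [if_pos hb]
    · have hts : topSum = 0 := by
        by_contra h
        exact hnd ⟨h, by omega, hb⟩
      rw [if_neg hb, hts]

theorem topArea_changed : Claim_changed_topArea := by
  unfold Claim_changed_topArea; decide

theorem topArea_tight : Claim_exact_topArea := by
  intro array row col topSum _ hpre hd
  rcases hd with ⟨hts, hr5, hb⟩
  rcases hpre with h5 | ⟨hlt, -, hok, -⟩
  · exact absurd h5 hr5
  · have hcol := pre_col_le array row col hok
    rw [topArea_eq array row col topSum hlt hcol,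
        topArea_alt_eq array row col topSum hlt, if_neg hb]
    omega
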